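-- pv_equiv track=rewrite | github.com/SIDDARTHAREDDY8/talentai-backend | nlp_engine.py | best_role_for_skills
-- ===== SOURCE A (Python) =====
-- from typing import List, Tuple
--
-- def best_role_for_skills(skills: List[str]) -> str:
--     """
--     Returns the role whose required skill set has the highest overlap
--     with the candidate's extracted skills.
--     """
--     ROLE_SKILLS = {
--         "Software Engineer":  ["Python","JavaScript","React","Node.js","SQL","Git","Docker","System Design","Algorithms"],
--         "Data Scientist":     ["Python","Machine Learning","Statistics","Pandas","NumPy","scikit-learn","TensorFlow","SQL"],
--         "Data Engineer":      ["Python","SQL","Apache Spark","Kafka","Airflow","AWS","ETL","Docker"],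
--         "ML Engineer":        ["Python","TensorFlow","PyTorch","MLOps","Docker","Kubernetes","scikit-learn"],
--         "Frontend Developer": ["JavaScript","TypeScript","React","CSS","HTML","Git","Webpack"],
--     }
--     skills_lower = {s.lower() for s in skills}
--     best, best_score = "Software Engineer", 0
--     for role, reqs in ROLE_SKILLS.items():
--         overlap = sum(1 for r in reqs if r.lower() in skills_lower)
--         if overlap > best_score:
--             best, best_score = role, overlap
--     return best
-- ===== SOURCE B (Python) =====
-- def best_role_for_skills(skills):
--     """
--     Returns the role whose required skill set has the highest overlap
--     with the candidate's extracted skills (inverted-index formulation).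
--     """
--     ROLE_SKILLS = {
--         "Software Engineer":  ["Python","JavaScript","React","Node.js","SQL","Git","Docker","System Design","Algorithms"],
--         "Data Scientist":     ["Python","Machine Learning","Statistics","Pandas","NumPy","scikit-learn","TensorFlow","SQL"],
--         "Data Engineer":      ["Python","SQL","Apache Spark","Kafka","Airflow","AWS","ETL","Docker"],
--         "ML Engineer":        ["Python","TensorFlow","PyTorch","MLOps","Docker","Kubernetes","scikit-learn"],
--         "Frontend Developer": ["JavaScript","TypeScript","React","CSS","HTML","Git","Webpack"],
--     }
--     index = {}
--     for role, reqs in ROLE_SKILLS.items():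
--         for r in reqs:
--             index.setdefault(r.lower(), []).append(role)
--     scores = {role: 0 for role in ROLE_SKILLS}
--     for s in {s.lower() for s in skills}:
--         for role in index.get(s, []):
--             scores[role] += 1
--     best, best_score = "Software Engineer", 0
--     for role in ROLE_SKILLS:
--         if scores[role] > best_score:
--             best, best_score = role, scores[role]
--     return best
-- ===== Notes on version B (the rewrite author's own statement) =====
-- stated objective: alternative
-- what changed: Replaces A's per-role scan over the candidate skill set with an inverted index from each lowercased required skill to the roles requiring it, scoring all roles in one counting pass over the deduplicated lowercased candidate skills before the same strict-'>' selection scan.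
import Mathlib
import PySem

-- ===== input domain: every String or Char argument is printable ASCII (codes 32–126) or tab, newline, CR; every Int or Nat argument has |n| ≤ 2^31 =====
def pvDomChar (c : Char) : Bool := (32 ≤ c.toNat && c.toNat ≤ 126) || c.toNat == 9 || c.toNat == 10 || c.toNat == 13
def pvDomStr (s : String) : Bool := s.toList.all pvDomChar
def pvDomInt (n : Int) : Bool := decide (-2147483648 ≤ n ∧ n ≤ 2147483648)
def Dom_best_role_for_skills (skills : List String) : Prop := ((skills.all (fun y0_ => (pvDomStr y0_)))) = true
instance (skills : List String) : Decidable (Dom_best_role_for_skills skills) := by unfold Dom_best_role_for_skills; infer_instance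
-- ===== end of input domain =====

-- B replaces A's per-role membership scan with an inverted index (lowered skill -> roles) and a
-- single counting pass over the deduplicated candidate skills; same result, alternative algorithm.

-- ===== PORT A =====
def pvROLE_SKILLS : List (String × List String) :=
  [("Software Engineer", ["Python","JavaScript","React","Node.js","SQL","Git","Docker","System Design","Algorithms"]),
   ("Data Scientist",    ["Python","Machine Learning","Statistics","Pandas","NumPy","scikit-learn","TensorFlow","SQL"]),
   ("Data Engineer",     ["Python","SQL","Apache Spark","Kafka","Airflow","AWS","ETL","Docker"]),
   ("ML Engineer",       ["Python","TensorFlow","PyTorch","MLOps","Docker","Kubernetes","scikit-learn"]),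
   ("Frontend Developer",["JavaScript","TypeScript","React","CSS","HTML","Git","Webpack"])]

def best_role_for_skills (skills : List String) : String :=
  let skills_lower : PySem.Set String := PySem.Set.ofList (skills.map PySem.Str.lower)
  let r := pvROLE_SKILLS.foldl
    (fun (acc : String × Int) p =>
      let overlap : Int :=
        (p.2.map (fun r => if skills_lower.contains (PySem.Str.lower r) then (1 : Int) else 0)).sum
      if overlap > acc.2 then (p.1, overlap) else acc)
    ("Software Engineer", 0)
  r.1

-- ===== PORT B =====
-- inverted index: lowered required skill -> roles requiring it ('index.setdefault(r.lower(), []).append(role)')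
def pvRoleIndex : PySem.Dict String (List String) :=
  pvROLE_SKILLS.foldl
    (fun d p => p.2.foldl (fun d r => d.modify (PySem.Str.lower r) [] (· ++ [p.1])) d)
    PySem.Dict.empty

def best_role_for_skills_alt (skills : List String) : String :=
  let scores0 : PySem.Dict String Int := PySem.Dict.ofList (pvROLE_SKILLS.map (fun p => (p.1, (0:Int))))
  let scores := (PySem.Set.ofList (skills.map PySem.Str.lower)).foldl
    (fun sc s => (pvRoleIndex.getD s []).foldl (fun sc role => sc.modify role 0 (· + 1)) sc)
    scores0
  let r := pvROLE_SKILLS.foldl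
    (fun (acc : String × Int) p =>
      if scores.getD p.1 0 > acc.2 then (p.1, scores.getD p.1 0) else acc)
    ("Software Engineer", 0)
  r.1

-- ===== PRECONDITION & SPEC =====
def Spec_best_role_for_skills (skills : List String) (out : String) : Prop := out = best_role_for_skills_alt skills
instance (skills : List String) (out : String) : Decidable (Spec_best_role_for_skills skills out) := by unfold Spec_best_role_for_skills; infer_instance

-- ===== CLAIM (what is proved, stated in full; the proofs are below) =====
def Claim_equal_best_role_for_skills : Prop := ∀ (skills : List String), Dom_best_role_for_skills skills → Spec_best_role_for_skills skills (best_role_for_skills skills)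

-- ===== LEMMAS AND PROOFS =====

set_option maxRecDepth 20000 in
lemma pvRoleIndex_eq : pvRoleIndex = PySem.Dict.mk
  [("python", ["Software Engineer","Data Scientist","Data Engineer","ML Engineer"]),
   ("javascript", ["Software Engineer","Frontend Developer"]),
   ("react", ["Software Engineer","Frontend Developer"]),
   ("node.js", ["Software Engineer"]),
   ("sql", ["Software Engineer","Data Scientist","Data Engineer"]),
   ("git", ["Software Engineer","Frontend Developer"]),
   ("docker", ["Software Engineer","Data Engineer","ML Engineer"]),
   ("system design", ["Software Engineer"]),
   ("algorithms", ["Software Engineer"]),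
   ("machine learning", ["Data Scientist"]),
   ("statistics", ["Data Scientist"]),
   ("pandas", ["Data Scientist"]),
   ("numpy", ["Data Scientist"]),
   ("scikit-learn", ["Data Scientist","ML Engineer"]),
   ("tensorflow", ["Data Scientist","ML Engineer"]),
   ("apache spark", ["Data Engineer"]),
   ("kafka", ["Data Engineer"]),
   ("airflow", ["Data Engineer"]),
   ("aws", ["Data Engineer"]),
   ("etl", ["Data Engineer"]),
   ("pytorch", ["ML Engineer"]),
   ("mlops", ["ML Engineer"]),
   ("kubernetes", ["ML Engineer"]),
   ("typescript", ["Frontend Developer"]),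
   ("css", ["Frontend Developer"]),
   ("html", ["Frontend Developer"]),
   ("webpack", ["Frontend Developer"])] := by decide

def pvK_SE : List String := ["python","javascript","react","node.js","sql","git","docker","system design","algorithms"]

set_option maxHeartbeats 1000000 in
lemma cnt_SE (s : String) : ((pvRoleIndex.getD s []).count "Software Engineer") = if s ∈ pvK_SE then 1 else 0 := by
  rw [pvRoleIndex_eq]
  by_cases h0 : (("python" : String) == s) = true
  · rw [beq_iff_eq] at h0; subst h0; decide
  by_cases h1 : (("javascript" : String) == s) = true
  · rw [beq_iff_eq] at h1; subst h1; decide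
  by_cases h2 : (("react" : String) == s) = true
  · rw [beq_iff_eq] at h2; subst h2; decide
  by_cases h3 : (("node.js" : String) == s) = true
  · rw [beq_iff_eq] at h3; subst h3; decide
  by_cases h4 : (("sql" : String) == s) = true
  · rw [beq_iff_eq] at h4; subst h4; decide
  by_cases h5 : (("git" : String) == s) = true
  · rw [beq_iff_eq] at h5; subst h5; decide
  by_cases h6 : (("docker" : String) == s) = true
  · rw [beq_iff_eq] at h6; subst h6; decide
  by_cases h7 : (("system design" : String) == s) = true
  · rw [beq_iff_eq] at h7; subst h7; decide
  by_cases h8 : (("algorithms" : String) == s) = true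
  · rw [beq_iff_eq] at h8; subst h8; decide
  by_cases h9 : (("machine learning" : String) == s) = true
  · rw [beq_iff_eq] at h9; subst h9; decide
  by_cases h10 : (("statistics" : String) == s) = true
  · rw [beq_iff_eq] at h10; subst h10; decide
  by_cases h11 : (("pandas" : String) == s) = true
  · rw [beq_iff_eq] at h11; subst h11; decide
  by_cases h12 : (("numpy" : String) == s) = true
  · rw [beq_iff_eq] at h12; subst h12; decide
  by_cases h13 : (("scikit-learn" : String) == s) = true
  · rw [beq_iff_eq] at h13; subst h13; decide
  by_cases h14 : (("tensorflow" : String) == s) = true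
  · rw [beq_iff_eq] at h14; subst h14; decide
  by_cases h15 : (("apache spark" : String) == s) = true
  · rw [beq_iff_eq] at h15; subst h15; decide
  by_cases h16 : (("kafka" : String) == s) = true
  · rw [beq_iff_eq] at h16; subst h16; decide
  by_cases h17 : (("airflow" : String) == s) = true
  · rw [beq_iff_eq] at h17; subst h17; decide
  by_cases h18 : (("aws" : String) == s) = true
  · rw [beq_iff_eq] at h18; subst h18; decide
  by_cases h19 : (("etl" : String) == s) = true
  · rw [beq_iff_eq] at h19; subst h19; decide
  by_cases h20 : (("pytorch" : String) == s) = true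
  · rw [beq_iff_eq] at h20; subst h20; decide
  by_cases h21 : (("mlops" : String) == s) = true
  · rw [beq_iff_eq] at h21; subst h21; decide
  by_cases h22 : (("kubernetes" : String) == s) = true
  · rw [beq_iff_eq] at h22; subst h22; decide
  by_cases h23 : (("typescript" : String) == s) = true
  · rw [beq_iff_eq] at h23; subst h23; decide
  by_cases h24 : (("css" : String) == s) = true
  · rw [beq_iff_eq] at h24; subst h24; decide
  by_cases h25 : (("html" : String) == s) = true
  · rw [beq_iff_eq] at h25; subst h25; decide
  by_cases h26 : (("webpack" : String) == s) = true
  · rw [beq_iff_eq] at h26; subst h26; decide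
  simp only [beq_eq_false_iff_ne, Bool.not_eq_true] at h0 h1 h2 h3 h4 h5 h6 h7 h8 h9 h10 h11 h12 h13 h14 h15 h16 h17 h18 h19 h20 h21 h22 h23 h24 h25 h26
  simp [PySem.Dict.getD, PySem.Dict.get?, pvK_SE, h0, h1, h2, h3, h4, h5, h6, h7, h8, h9, h10, h11, h12, h13, h14, h15, h16, h17, h18, h19, h20, h21, h22, h23, h24, h25, h26]
  exact ⟨Ne.symm h0, Ne.symm h1, Ne.symm h2, Ne.symm h3, Ne.symm h4, Ne.symm h5, Ne.symm h6, Ne.symm h7, Ne.symm h8⟩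

def pvK_DS : List String := ["python","machine learning","statistics","pandas","numpy","scikit-learn","tensorflow","sql"]

set_option maxHeartbeats 1000000 in
lemma cnt_DS (s : String) : ((pvRoleIndex.getD s []).count "Data Scientist") = if s ∈ pvK_DS then 1 else 0 := by
  rw [pvRoleIndex_eq]
  by_cases h0 : (("python" : String) == s) = true
  · rw [beq_iff_eq] at h0; subst h0; decide
  by_cases h1 : (("javascript" : String) == s) = true
  · rw [beq_iff_eq] at h1; subst h1; decide
  by_cases h2 : (("react" : String) == s) = true
  · rw [beq_iff_eq] at h2; subst h2; decide
  by_cases h3 : (("node.js" : String) == s) = true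
  · rw [beq_iff_eq] at h3; subst h3; decide
  by_cases h4 : (("sql" : String) == s) = true
  · rw [beq_iff_eq] at h4; subst h4; decide
  by_cases h5 : (("git" : String) == s) = true
  · rw [beq_iff_eq] at h5; subst h5; decide
  by_cases h6 : (("docker" : String) == s) = true
  · rw [beq_iff_eq] at h6; subst h6; decide
  by_cases h7 : (("system design" : String) == s) = true
  · rw [beq_iff_eq] at h7; subst h7; decide
  by_cases h8 : (("algorithms" : String) == s) = true
  · rw [beq_iff_eq] at h8; subst h8; decide
  by_cases h9 : (("machine learning" : String) == s) = true
  · rw [beq_iff_eq] at h9; subst h9; decide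
  by_cases h10 : (("statistics" : String) == s) = true
  · rw [beq_iff_eq] at h10; subst h10; decide
  by_cases h11 : (("pandas" : String) == s) = true
  · rw [beq_iff_eq] at h11; subst h11; decide
  by_cases h12 : (("numpy" : String) == s) = true
  · rw [beq_iff_eq] at h12; subst h12; decide
  by_cases h13 : (("scikit-learn" : String) == s) = true
  · rw [beq_iff_eq] at h13; subst h13; decide
  by_cases h14 : (("tensorflow" : String) == s) = true
  · rw [beq_iff_eq] at h14; subst h14; decide
  by_cases h15 : (("apache spark" : String) == s) = true
  · rw [beq_iff_eq] at h15; subst h15; decide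
  by_cases h16 : (("kafka" : String) == s) = true
  · rw [beq_iff_eq] at h16; subst h16; decide
  by_cases h17 : (("airflow" : String) == s) = true
  · rw [beq_iff_eq] at h17; subst h17; decide
  by_cases h18 : (("aws" : String) == s) = true
  · rw [beq_iff_eq] at h18; subst h18; decide
  by_cases h19 : (("etl" : String) == s) = true
  · rw [beq_iff_eq] at h19; subst h19; decide
  by_cases h20 : (("pytorch" : String) == s) = true
  · rw [beq_iff_eq] at h20; subst h20; decide
  by_cases h21 : (("mlops" : String) == s) = true
  · rw [beq_iff_eq] at h21; subst h21; decide
  by_cases h22 : (("kubernetes" : String) == s) = true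
  · rw [beq_iff_eq] at h22; subst h22; decide
  by_cases h23 : (("typescript" : String) == s) = true
  · rw [beq_iff_eq] at h23; subst h23; decide
  by_cases h24 : (("css" : String) == s) = true
  · rw [beq_iff_eq] at h24; subst h24; decide
  by_cases h25 : (("html" : String) == s) = true
  · rw [beq_iff_eq] at h25; subst h25; decide
  by_cases h26 : (("webpack" : String) == s) = true
  · rw [beq_iff_eq] at h26; subst h26; decide
  simp only [beq_eq_false_iff_ne, Bool.not_eq_true] at h0 h1 h2 h3 h4 h5 h6 h7 h8 h9 h10 h11 h12 h13 h14 h15 h16 h17 h18 h19 h20 h21 h22 h23 h24 h25 h26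
  simp [PySem.Dict.getD, PySem.Dict.get?, pvK_DS, h0, h1, h2, h3, h4, h5, h6, h7, h8, h9, h10, h11, h12, h13, h14, h15, h16, h17, h18, h19, h20, h21, h22, h23, h24, h25, h26]
  exact ⟨Ne.symm h0, Ne.symm h9, Ne.symm h10, Ne.symm h11, Ne.symm h12, Ne.symm h13, Ne.symm h14, Ne.symm h4⟩

def pvK_DE : List String := ["python","sql","apache spark","kafka","airflow","aws","etl","docker"]

set_option maxHeartbeats 1000000 in
lemma cnt_DE (s : String) : ((pvRoleIndex.getD s []).count "Data Engineer") = if s ∈ pvK_DE then 1 else 0 := by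
  rw [pvRoleIndex_eq]
  by_cases h0 : (("python" : String) == s) = true
  · rw [beq_iff_eq] at h0; subst h0; decide
  by_cases h1 : (("javascript" : String) == s) = true
  · rw [beq_iff_eq] at h1; subst h1; decide
  by_cases h2 : (("react" : String) == s) = true
  · rw [beq_iff_eq] at h2; subst h2; decide
  by_cases h3 : (("node.js" : String) == s) = true
  · rw [beq_iff_eq] at h3; subst h3; decide
  by_cases h4 : (("sql" : String) == s) = true
  · rw [beq_iff_eq] at h4; subst h4; decide
  by_cases h5 : (("git" : String) == s) = true
  · rw [beq_iff_eq] at h5; subst h5; decide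
  by_cases h6 : (("docker" : String) == s) = true
  · rw [beq_iff_eq] at h6; subst h6; decide
  by_cases h7 : (("system design" : String) == s) = true
  · rw [beq_iff_eq] at h7; subst h7; decide
  by_cases h8 : (("algorithms" : String) == s) = true
  · rw [beq_iff_eq] at h8; subst h8; decide
  by_cases h9 : (("machine learning" : String) == s) = true
  · rw [beq_iff_eq] at h9; subst h9; decide
  by_cases h10 : (("statistics" : String) == s) = true
  · rw [beq_iff_eq] at h10; subst h10; decide
  by_cases h11 : (("pandas" : String) == s) = true
  · rw [beq_iff_eq] at h11; subst h11; decide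
  by_cases h12 : (("numpy" : String) == s) = true
  · rw [beq_iff_eq] at h12; subst h12; decide
  by_cases h13 : (("scikit-learn" : String) == s) = true
  · rw [beq_iff_eq] at h13; subst h13; decide
  by_cases h14 : (("tensorflow" : String) == s) = true
  · rw [beq_iff_eq] at h14; subst h14; decide
  by_cases h15 : (("apache spark" : String) == s) = true
  · rw [beq_iff_eq] at h15; subst h15; decide
  by_cases h16 : (("kafka" : String) == s) = true
  · rw [beq_iff_eq] at h16; subst h16; decide
  by_cases h17 : (("airflow" : String) == s) = true
  · rw [beq_iff_eq] at h17; subst h17; decide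
  by_cases h18 : (("aws" : String) == s) = true
  · rw [beq_iff_eq] at h18; subst h18; decide
  by_cases h19 : (("etl" : String) == s) = true
  · rw [beq_iff_eq] at h19; subst h19; decide
  by_cases h20 : (("pytorch" : String) == s) = true
  · rw [beq_iff_eq] at h20; subst h20; decide
  by_cases h21 : (("mlops" : String) == s) = true
  · rw [beq_iff_eq] at h21; subst h21; decide
  by_cases h22 : (("kubernetes" : String) == s) = true
  · rw [beq_iff_eq] at h22; subst h22; decide
  by_cases h23 : (("typescript" : String) == s) = true
  · rw [beq_iff_eq] at h23; subst h23; decide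
  by_cases h24 : (("css" : String) == s) = true
  · rw [beq_iff_eq] at h24; subst h24; decide
  by_cases h25 : (("html" : String) == s) = true
  · rw [beq_iff_eq] at h25; subst h25; decide
  by_cases h26 : (("webpack" : String) == s) = true
  · rw [beq_iff_eq] at h26; subst h26; decide
  simp only [beq_eq_false_iff_ne, Bool.not_eq_true] at h0 h1 h2 h3 h4 h5 h6 h7 h8 h9 h10 h11 h12 h13 h14 h15 h16 h17 h18 h19 h20 h21 h22 h23 h24 h25 h26
  simp [PySem.Dict.getD, PySem.Dict.get?, pvK_DE, h0, h1, h2, h3, h4, h5, h6, h7, h8, h9, h10, h11, h12, h13, h14, h15, h16, h17, h18, h19, h20, h21, h22, h23, h24, h25, h26]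
  exact ⟨Ne.symm h0, Ne.symm h4, Ne.symm h15, Ne.symm h16, Ne.symm h17, Ne.symm h18, Ne.symm h19, Ne.symm h6⟩

def pvK_MLE : List String := ["python","tensorflow","pytorch","mlops","docker","kubernetes","scikit-learn"]

set_option maxHeartbeats 1000000 in
lemma cnt_MLE (s : String) : ((pvRoleIndex.getD s []).count "ML Engineer") = if s ∈ pvK_MLE then 1 else 0 := by
  rw [pvRoleIndex_eq]
  by_cases h0 : (("python" : String) == s) = true
  · rw [beq_iff_eq] at h0; subst h0; decide
  by_cases h1 : (("javascript" : String) == s) = true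
  · rw [beq_iff_eq] at h1; subst h1; decide
  by_cases h2 : (("react" : String) == s) = true
  · rw [beq_iff_eq] at h2; subst h2; decide
  by_cases h3 : (("node.js" : String) == s) = true
  · rw [beq_iff_eq] at h3; subst h3; decide
  by_cases h4 : (("sql" : String) == s) = true
  · rw [beq_iff_eq] at h4; subst h4; decide
  by_cases h5 : (("git" : String) == s) = true
  · rw [beq_iff_eq] at h5; subst h5; decide
  by_cases h6 : (("docker" : String) == s) = true
  · rw [beq_iff_eq] at h6; subst h6; decide
  by_cases h7 : (("system design" : String) == s) = true
  · rw [beq_iff_eq] at h7; subst h7; decide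
  by_cases h8 : (("algorithms" : String) == s) = true
  · rw [beq_iff_eq] at h8; subst h8; decide
  by_cases h9 : (("machine learning" : String) == s) = true
  · rw [beq_iff_eq] at h9; subst h9; decide
  by_cases h10 : (("statistics" : String) == s) = true
  · rw [beq_iff_eq] at h10; subst h10; decide
  by_cases h11 : (("pandas" : String) == s) = true
  · rw [beq_iff_eq] at h11; subst h11; decide
  by_cases h12 : (("numpy" : String) == s) = true
  · rw [beq_iff_eq] at h12; subst h12; decide
  by_cases h13 : (("scikit-learn" : String) == s) = true
  · rw [beq_iff_eq] at h13; subst h13; decide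
  by_cases h14 : (("tensorflow" : String) == s) = true
  · rw [beq_iff_eq] at h14; subst h14; decide
  by_cases h15 : (("apache spark" : String) == s) = true
  · rw [beq_iff_eq] at h15; subst h15; decide
  by_cases h16 : (("kafka" : String) == s) = true
  · rw [beq_iff_eq] at h16; subst h16; decide
  by_cases h17 : (("airflow" : String) == s) = true
  · rw [beq_iff_eq] at h17; subst h17; decide
  by_cases h18 : (("aws" : String) == s) = true
  · rw [beq_iff_eq] at h18; subst h18; decide
  by_cases h19 : (("etl" : String) == s) = true
  · rw [beq_iff_eq] at h19; subst h19; decide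
  by_cases h20 : (("pytorch" : String) == s) = true
  · rw [beq_iff_eq] at h20; subst h20; decide
  by_cases h21 : (("mlops" : String) == s) = true
  · rw [beq_iff_eq] at h21; subst h21; decide
  by_cases h22 : (("kubernetes" : String) == s) = true
  · rw [beq_iff_eq] at h22; subst h22; decide
  by_cases h23 : (("typescript" : String) == s) = true
  · rw [beq_iff_eq] at h23; subst h23; decide
  by_cases h24 : (("css" : String) == s) = true
  · rw [beq_iff_eq] at h24; subst h24; decide
  by_cases h25 : (("html" : String) == s) = true
  · rw [beq_iff_eq] at h25; subst h25; decide
  by_cases h26 : (("webpack" : String) == s) = true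
  · rw [beq_iff_eq] at h26; subst h26; decide
  simp only [beq_eq_false_iff_ne, Bool.not_eq_true] at h0 h1 h2 h3 h4 h5 h6 h7 h8 h9 h10 h11 h12 h13 h14 h15 h16 h17 h18 h19 h20 h21 h22 h23 h24 h25 h26
  simp [PySem.Dict.getD, PySem.Dict.get?, pvK_MLE, h0, h1, h2, h3, h4, h5, h6, h7, h8, h9, h10, h11, h12, h13, h14, h15, h16, h17, h18, h19, h20, h21, h22, h23, h24, h25, h26]
  exact ⟨Ne.symm h0, Ne.symm h14, Ne.symm h20, Ne.symm h21, Ne.symm h6, Ne.symm h22, Ne.symm h13⟩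

def pvK_FE : List String := ["javascript","typescript","react","css","html","git","webpack"]

set_option maxHeartbeats 1000000 in
lemma cnt_FE (s : String) : ((pvRoleIndex.getD s []).count "Frontend Developer") = if s ∈ pvK_FE then 1 else 0 := by
  rw [pvRoleIndex_eq]
  by_cases h0 : (("python" : String) == s) = true
  · rw [beq_iff_eq] at h0; subst h0; decide
  by_cases h1 : (("javascript" : String) == s) = true
  · rw [beq_iff_eq] at h1; subst h1; decide
  by_cases h2 : (("react" : String) == s) = true
  · rw [beq_iff_eq] at h2; subst h2; decide
  by_cases h3 : (("node.js" : String) == s) = true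
  · rw [beq_iff_eq] at h3; subst h3; decide
  by_cases h4 : (("sql" : String) == s) = true
  · rw [beq_iff_eq] at h4; subst h4; decide
  by_cases h5 : (("git" : String) == s) = true
  · rw [beq_iff_eq] at h5; subst h5; decide
  by_cases h6 : (("docker" : String) == s) = true
  · rw [beq_iff_eq] at h6; subst h6; decide
  by_cases h7 : (("system design" : String) == s) = true
  · rw [beq_iff_eq] at h7; subst h7; decide
  by_cases h8 : (("algorithms" : String) == s) = true
  · rw [beq_iff_eq] at h8; subst h8; decide
  by_cases h9 : (("machine learning" : String) == s) = true
  · rw [beq_iff_eq] at h9; subst h9; decide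
  by_cases h10 : (("statistics" : String) == s) = true
  · rw [beq_iff_eq] at h10; subst h10; decide
  by_cases h11 : (("pandas" : String) == s) = true
  · rw [beq_iff_eq] at h11; subst h11; decide
  by_cases h12 : (("numpy" : String) == s) = true
  · rw [beq_iff_eq] at h12; subst h12; decide
  by_cases h13 : (("scikit-learn" : String) == s) = true
  · rw [beq_iff_eq] at h13; subst h13; decide
  by_cases h14 : (("tensorflow" : String) == s) = true
  · rw [beq_iff_eq] at h14; subst h14; decide
  by_cases h15 : (("apache spark" : String) == s) = true
  · rw [beq_iff_eq] at h15; subst h15; decide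
  by_cases h16 : (("kafka" : String) == s) = true
  · rw [beq_iff_eq] at h16; subst h16; decide
  by_cases h17 : (("airflow" : String) == s) = true
  · rw [beq_iff_eq] at h17; subst h17; decide
  by_cases h18 : (("aws" : String) == s) = true
  · rw [beq_iff_eq] at h18; subst h18; decide
  by_cases h19 : (("etl" : String) == s) = true
  · rw [beq_iff_eq] at h19; subst h19; decide
  by_cases h20 : (("pytorch" : String) == s) = true
  · rw [beq_iff_eq] at h20; subst h20; decide
  by_cases h21 : (("mlops" : String) == s) = true
  · rw [beq_iff_eq] at h21; subst h21; decide
  by_cases h22 : (("kubernetes" : String) == s) = true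
  · rw [beq_iff_eq] at h22; subst h22; decide
  by_cases h23 : (("typescript" : String) == s) = true
  · rw [beq_iff_eq] at h23; subst h23; decide
  by_cases h24 : (("css" : String) == s) = true
  · rw [beq_iff_eq] at h24; subst h24; decide
  by_cases h25 : (("html" : String) == s) = true
  · rw [beq_iff_eq] at h25; subst h25; decide
  by_cases h26 : (("webpack" : String) == s) = true
  · rw [beq_iff_eq] at h26; subst h26; decide
  simp only [beq_eq_false_iff_ne, Bool.not_eq_true] at h0 h1 h2 h3 h4 h5 h6 h7 h8 h9 h10 h11 h12 h13 h14 h15 h16 h17 h18 h19 h20 h21 h22 h23 h24 h25 h26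
  simp [PySem.Dict.getD, PySem.Dict.get?, pvK_FE, h0, h1, h2, h3, h4, h5, h6, h7, h8, h9, h10, h11, h12, h13, h14, h15, h16, h17, h18, h19, h20, h21, h22, h23, h24, h25, h26]
  exact ⟨Ne.symm h1, Ne.symm h23, Ne.symm h2, Ne.symm h24, Ne.symm h25, Ne.symm h5, Ne.symm h26⟩

lemma countP_mem_comm {α : Type} [DecidableEq α] (S K : List α) (hS : S.Nodup) (hK : K.Nodup) :
    S.countP (fun s => decide (s ∈ K)) = K.countP (fun k => decide (k ∈ S)) := by
  rw [List.countP_eq_length_filter, List.countP_eq_length_filter,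
      ← List.toFinset_card_of_nodup (hS.filter _), ← List.toFinset_card_of_nodup (hK.filter _),
      List.toFinset_filter, List.toFinset_filter]
  congr 1
  ext x
  simp [Finset.mem_filter, List.mem_toFinset]
  tauto

lemma scoreLoop_getD (S : List String) (sc : PySem.Dict String Int) (v : String) :
    (S.foldl (fun sc s => (pvRoleIndex.getD s []).foldl (fun sc role => sc.modify role 0 (· + 1)) sc) sc).getD v 0
    = sc.getD v 0 + ((S.map (fun s => ((pvRoleIndex.getD s []).count v : Int))).sum) := by
  induction S generalizing sc with
  | nil => simp only [List.foldl_nil, List.map_nil, List.sum_nil, add_zero]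
  | cons a S ih =>
    simp only [List.foldl_cons, List.map_cons, List.sum_cons, ih,
      PySem.Dict.getD_foldl_modify_add_one]
    ring

lemma sum_cnt (S : List String) (v : String) (K : List String)
    (hcnt : ∀ s, ((pvRoleIndex.getD s []).count v) = if s ∈ K then 1 else 0) :
    ((S.map (fun s => ((pvRoleIndex.getD s []).count v : Int))).sum)
    = (S.countP (fun s => decide (s ∈ K)) : Int) := by
  rw [← PySem.List.sum_map_ite_one_zero (fun s => decide (s ∈ K)) S]
  congr 1
  refine List.map_congr_left (fun s _ => ?_)
  rw [hcnt s]
  by_cases h : s ∈ K <;> simp [h]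


lemma ovA_SE (S : List String) :
    ((["Python","JavaScript","React","Node.js","SQL","Git","Docker","System Design","Algorithms"].map
        (fun r => if PySem.Set.contains S (PySem.Str.lower r) = true then (1 : Int) else 0)).sum)
    = (pvK_SE.countP (fun k => decide (k ∈ S)) : Int) := by
  have l0 : PySem.Str.lower "Python" = "python" := by rfl
  have l1 : PySem.Str.lower "JavaScript" = "javascript" := by rfl
  have l2 : PySem.Str.lower "React" = "react" := by rfl
  have l3 : PySem.Str.lower "Node.js" = "node.js" := by rfl
  have l4 : PySem.Str.lower "SQL" = "sql" := by rfl
  have l5 : PySem.Str.lower "Git" = "git" := by rfl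
  have l6 : PySem.Str.lower "Docker" = "docker" := by rfl
  have l7 : PySem.Str.lower "System Design" = "system design" := by rfl
  have l8 : PySem.Str.lower "Algorithms" = "algorithms" := by rfl
  simp [pvK_SE, List.countP_cons, l0, l1, l2, l3, l4, l5, l6, l7, l8]

  ring

lemma ovA_DS (S : List String) :
    ((["Python","Machine Learning","Statistics","Pandas","NumPy","scikit-learn","TensorFlow","SQL"].map
        (fun r => if PySem.Set.contains S (PySem.Str.lower r) = true then (1 : Int) else 0)).sum)
    = (pvK_DS.countP (fun k => decide (k ∈ S)) : Int) := by
  have l0 : PySem.Str.lower "Python" = "python" := by rfl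
  have l1 : PySem.Str.lower "Machine Learning" = "machine learning" := by rfl
  have l2 : PySem.Str.lower "Statistics" = "statistics" := by rfl
  have l3 : PySem.Str.lower "Pandas" = "pandas" := by rfl
  have l4 : PySem.Str.lower "NumPy" = "numpy" := by rfl
  have l5 : PySem.Str.lower "scikit-learn" = "scikit-learn" := by rfl
  have l6 : PySem.Str.lower "TensorFlow" = "tensorflow" := by rfl
  have l7 : PySem.Str.lower "SQL" = "sql" := by rfl
  simp [pvK_DS, List.countP_cons, l0, l1, l2, l3, l4, l5, l6, l7]

  ring

lemma ovA_DE (S : List String) :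
    ((["Python","SQL","Apache Spark","Kafka","Airflow","AWS","ETL","Docker"].map
        (fun r => if PySem.Set.contains S (PySem.Str.lower r) = true then (1 : Int) else 0)).sum)
    = (pvK_DE.countP (fun k => decide (k ∈ S)) : Int) := by
  have l0 : PySem.Str.lower "Python" = "python" := by rfl
  have l1 : PySem.Str.lower "SQL" = "sql" := by rfl
  have l2 : PySem.Str.lower "Apache Spark" = "apache spark" := by rfl
  have l3 : PySem.Str.lower "Kafka" = "kafka" := by rfl
  have l4 : PySem.Str.lower "Airflow" = "airflow" := by rfl
  have l5 : PySem.Str.lower "AWS" = "aws" := by rfl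
  have l6 : PySem.Str.lower "ETL" = "etl" := by rfl
  have l7 : PySem.Str.lower "Docker" = "docker" := by rfl
  simp [pvK_DE, List.countP_cons, l0, l1, l2, l3, l4, l5, l6, l7]

  ring

lemma ovA_MLE (S : List String) :
    ((["Python","TensorFlow","PyTorch","MLOps","Docker","Kubernetes","scikit-learn"].map
        (fun r => if PySem.Set.contains S (PySem.Str.lower r) = true then (1 : Int) else 0)).sum)
    = (pvK_MLE.countP (fun k => decide (k ∈ S)) : Int) := by
  have l0 : PySem.Str.lower "Python" = "python" := by rfl
  have l1 : PySem.Str.lower "TensorFlow" = "tensorflow" := by rfl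
  have l2 : PySem.Str.lower "PyTorch" = "pytorch" := by rfl
  have l3 : PySem.Str.lower "MLOps" = "mlops" := by rfl
  have l4 : PySem.Str.lower "Docker" = "docker" := by rfl
  have l5 : PySem.Str.lower "Kubernetes" = "kubernetes" := by rfl
  have l6 : PySem.Str.lower "scikit-learn" = "scikit-learn" := by rfl
  simp [pvK_MLE, List.countP_cons, l0, l1, l2, l3, l4, l5, l6]

  ring

lemma ovA_FE (S : List String) :
    ((["JavaScript","TypeScript","React","CSS","HTML","Git","Webpack"].map
        (fun r => if PySem.Set.contains S (PySem.Str.lower r) = true then (1 : Int) else 0)).sum)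
    = (pvK_FE.countP (fun k => decide (k ∈ S)) : Int) := by
  have l0 : PySem.Str.lower "JavaScript" = "javascript" := by rfl
  have l1 : PySem.Str.lower "TypeScript" = "typescript" := by rfl
  have l2 : PySem.Str.lower "React" = "react" := by rfl
  have l3 : PySem.Str.lower "CSS" = "css" := by rfl
  have l4 : PySem.Str.lower "HTML" = "html" := by rfl
  have l5 : PySem.Str.lower "Git" = "git" := by rfl
  have l6 : PySem.Str.lower "Webpack" = "webpack" := by rfl
  simp [pvK_FE, List.countP_cons, l0, l1, l2, l3, l4, l5, l6]

  ring

set_option maxHeartbeats 2000000 in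
lemma pvAB_eq (skills : List String) : best_role_for_skills skills = best_role_for_skills_alt skills := by
  unfold best_role_for_skills best_role_for_skills_alt
  have hS : (PySem.Set.ofList (skills.map PySem.Str.lower)).Nodup := PySem.Set.nodup_ofList _
  have key : ∀ (v : String) (K : List String),
      (∀ s, ((pvRoleIndex.getD s []).count v) = if s ∈ K then 1 else 0) →
      K.Nodup →
      ((PySem.Dict.ofList (pvROLE_SKILLS.map (fun p => (p.1, (0:Int))))).getD v 0 = 0) →
      (((PySem.Set.ofList (skills.map PySem.Str.lower)).foldl
          (fun sc s => (pvRoleIndex.getD s []).foldl (fun sc role => sc.modify role 0 (· + 1)) sc)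
          (PySem.Dict.ofList (pvROLE_SKILLS.map (fun p => (p.1, (0:Int)))))).getD v 0)
        = (K.countP (fun k => decide (k ∈ (PySem.Set.ofList (skills.map PySem.Str.lower) : List String))) : Int) := by
    intro v K hcnt hK h0
    rw [scoreLoop_getD, sum_cnt _ _ _ hcnt, h0, zero_add,
        countP_mem_comm _ _ hS hK]
  have eSE := key "Software Engineer" pvK_SE cnt_SE (by decide) (by decide)
  have eDS := key "Data Scientist" pvK_DS cnt_DS (by decide) (by decide)
  have eDE := key "Data Engineer" pvK_DE cnt_DE (by decide) (by decide)
  have eMLE := key "ML Engineer" pvK_MLE cnt_MLE (by decide) (by decide)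
  have eFE := key "Frontend Developer" pvK_FE cnt_FE (by decide) (by decide)
  simp only [pvROLE_SKILLS, List.foldl_cons, List.foldl_nil] at *
  rw [eSE, eDS, eDE, eMLE, eFE,
      ovA_SE, ovA_DS, ovA_DE, ovA_MLE, ovA_FE]

-- ===== VERDICT (by name: the statement is the Claim_ definition above) =====
theorem best_role_for_skills_spec : Claim_equal_best_role_for_skills := by
  intro skills _
  unfold Spec_best_role_for_skills
  exact pvAB_eq skills
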